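-- pv_equiv track=rewrite | github.com/Radith0/Final_Diavita | backend/agents/llm_agent.py | _get_default_recommendations
-- ===== SOURCE A (Python) =====
-- def _get_default_recommendations(risk_factors: list) -> list:
--     """
--     Generate default recommendations based on risk factors.
--
--     Args:
--         risk_factors: List of identified risk factors
--
--     Returns:
--         List of default recommendations
--     """
--     recommendations = [
--         "Maintain a healthy diet rich in vegetables, whole grains, and lean proteins",
--         "Engage in at least 150 minutes of moderate physical activity per week",
--         "Monitor your blood glucose levels regularly",
--         "Get adequate sleep (7-9 hours per night)",
--         "Schedule regular check-ups with your healthcare provider"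
--     ]
--
--     # Customize based on specific risk factors
--     for factor in risk_factors:
--         if 'BMI' in factor.get('factor', ''):
--             recommendations.insert(0, "Work towards achieving a healthy BMI through balanced diet and exercise")
--         elif 'sleep' in factor.get('factor', '').lower():
--             recommendations.insert(0, "Improve sleep quality by maintaining a consistent sleep schedule")
--         elif 'physical activity' in factor.get('factor', '').lower():
--             recommendations.insert(0, "Gradually increase daily physical activity, starting with walking")
--
--     return recommendations[:5]
-- ===== SOURCE B (Python) =====
-- def _get_default_recommendations(risk_factors: list) -> list:
--     """Since the result is capped at five items and custom items stack in front
--     (last match first), walk the factors BACK-TO-FRONT, collect matches and stop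
--     as soon as five are found; pad the remainder with the base list."""
--     base = [
--         "Maintain a healthy diet rich in vegetables, whole grains, and lean proteins",
--         "Engage in at least 150 minutes of moderate physical activity per week",
--         "Monitor your blood glucose levels regularly",
--         "Get adequate sleep (7-9 hours per night)",
--         "Schedule regular check-ups with your healthcare provider"
--     ]
--     out = []
--     for factor in reversed(risk_factors):
--         if len(out) == 5:
--             break
--         name = factor.get('factor', '')
--         if 'BMI' in name:
--             out.append("Work towards achieving a healthy BMI through balanced diet and exercise")
--         elif 'sleep' in name.lower():
--             out.append("Improve sleep quality by maintaining a consistent sleep schedule")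
--         elif 'physical activity' in name.lower():
--             out.append("Gradually increase daily physical activity, starting with walking")
--     return out + base[:5 - len(out)]
-- ===== Notes on version B (the rewrite author's own statement) =====
-- stated objective: alternative
-- what changed: Instead of building the full list by repeated insert(0,...) and slicing, B exploits the 5-item cap: it traverses the risk factors in reverse, collects at most five matched custom recommendations with an early break, and pads with a prefix of the base list.
import Mathlib
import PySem

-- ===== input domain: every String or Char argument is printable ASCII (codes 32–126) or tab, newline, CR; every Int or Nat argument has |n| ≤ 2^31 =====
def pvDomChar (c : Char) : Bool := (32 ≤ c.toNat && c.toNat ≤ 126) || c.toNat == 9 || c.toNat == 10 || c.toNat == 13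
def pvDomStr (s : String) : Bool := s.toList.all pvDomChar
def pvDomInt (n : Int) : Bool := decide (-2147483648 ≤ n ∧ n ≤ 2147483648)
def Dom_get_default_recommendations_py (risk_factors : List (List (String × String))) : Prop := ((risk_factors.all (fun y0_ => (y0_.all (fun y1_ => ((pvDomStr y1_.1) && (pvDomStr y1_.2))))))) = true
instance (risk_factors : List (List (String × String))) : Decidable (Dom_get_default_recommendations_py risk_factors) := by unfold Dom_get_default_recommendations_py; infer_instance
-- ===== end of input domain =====

-- ===== PORT A =====
-- Literal port of A: build the 5-element base list, then for each factor insert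
-- (at position 0) the matching custom recommendation via an if/elif chain; slice [:5].
def get_default_recommendations_py (risk_factors : List (List (String × String))) : List String :=
  let recommendations : List String :=
    ["Maintain a healthy diet rich in vegetables, whole grains, and lean proteins",
     "Engage in at least 150 minutes of moderate physical activity per week",
     "Monitor your blood glucose levels regularly",
     "Get adequate sleep (7-9 hours per night)",
     "Schedule regular check-ups with your healthcare provider"]
  let final := risk_factors.foldl (fun recs factor =>
    if PySem.Str.isIn "BMI" (PySem.Dict.getD ⟨factor⟩ "factor" "") then
      "Work towards achieving a healthy BMI through balanced diet and exercise" :: recs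
    else if PySem.Str.isIn "sleep" (PySem.Str.lower (PySem.Dict.getD ⟨factor⟩ "factor" "")) then
      "Improve sleep quality by maintaining a consistent sleep schedule" :: recs
    else if PySem.Str.isIn "physical activity" (PySem.Str.lower (PySem.Dict.getD ⟨factor⟩ "factor" "")) then
      "Gradually increase daily physical activity, starting with walking" :: recs
    else recs) recommendations
  PySem.List.slice final none (some 5)

-- ===== PORT B =====
-- B's if/elif chain as an Option-valued classifier of one factor.
def pvPick (factor : List (String × String)) : Option String :=
  let name := PySem.Dict.getD ⟨factor⟩ "factor" ""
  if PySem.Str.isIn "BMI" name then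
    some "Work towards achieving a healthy BMI through balanced diet and exercise"
  else if PySem.Str.isIn "sleep" (PySem.Str.lower name) then
    some "Improve sleep quality by maintaining a consistent sleep schedule"
  else if PySem.Str.isIn "physical activity" (PySem.Str.lower name) then
    some "Gradually increase daily physical activity, starting with walking"
  else none

-- B's back-to-front collection loop with the `len(out) == 5: break` early exit.
def pvCollect : List (List (String × String)) → List String → List String
  | [], out => out
  | f :: t, out =>
    if out.length == 5 then out
    else pvCollect t (match pvPick f with | some r => out ++ [r] | none => out)

-- Port of B: reverse traversal gathering at most five custom items, then pad
-- with a prefix of the base list (`base[:5-len(out)]`; 5-len(out) ≥ 0 here).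
def get_default_recommendations_py_alt (risk_factors : List (List (String × String))) : List String :=
  let base : List String :=
    ["Maintain a healthy diet rich in vegetables, whole grains, and lean proteins",
     "Engage in at least 150 minutes of moderate physical activity per week",
     "Monitor your blood glucose levels regularly",
     "Get adequate sleep (7-9 hours per night)",
     "Schedule regular check-ups with your healthcare provider"]
  let out := pvCollect risk_factors.reverse []
  out ++ base.take (5 - out.length)

-- ===== PRECONDITION & SPEC =====
def Spec_get_default_recommendations_py (risk_factors : List (List (String × String))) (out : List String) : Prop := out = get_default_recommendations_py_alt risk_factors
instance (risk_factors : List (List (String × String))) (out : List String) : Decidable (Spec_get_default_recommendations_py risk_factors out) := by unfold Spec_get_default_recommendations_py; infer_instance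

-- ===== CLAIM (what is proved, stated in full; the proofs are below) =====
def Claim_equal_get_default_recommendations_py : Prop := ∀ (risk_factors : List (List (String × String))), Dom_get_default_recommendations_py risk_factors → Spec_get_default_recommendations_py risk_factors (get_default_recommendations_py risk_factors)

-- ===== LEMMAS AND PROOFS =====
-- A's cons-accumulating fold prepends, to its start value, the reversed list of
-- the matches (B's classifier applied as a filterMap).
lemma pvA_fold (rf : List (List (String × String))) (init : List String) :
    rf.foldl (fun recs factor =>
      if PySem.Str.isIn "BMI" (PySem.Dict.getD ⟨factor⟩ "factor" "") then
        "Work towards achieving a healthy BMI through balanced diet and exercise" :: recs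
      else if PySem.Str.isIn "sleep" (PySem.Str.lower (PySem.Dict.getD ⟨factor⟩ "factor" "")) then
        "Improve sleep quality by maintaining a consistent sleep schedule" :: recs
      else if PySem.Str.isIn "physical activity" (PySem.Str.lower (PySem.Dict.getD ⟨factor⟩ "factor" "")) then
        "Gradually increase daily physical activity, starting with walking" :: recs
      else recs) init
    = (rf.filterMap pvPick).reverse ++ init := by
  induction rf generalizing init with
  | nil => simp
  | cons f t ih =>
    simp only [List.foldl_cons, List.filterMap_cons]
    have hstep : (if PySem.Str.isIn "BMI" (PySem.Dict.getD ⟨f⟩ "factor" "") then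
        "Work towards achieving a healthy BMI through balanced diet and exercise" :: init
      else if PySem.Str.isIn "sleep" (PySem.Str.lower (PySem.Dict.getD ⟨f⟩ "factor" "")) then
        "Improve sleep quality by maintaining a consistent sleep schedule" :: init
      else if PySem.Str.isIn "physical activity" (PySem.Str.lower (PySem.Dict.getD ⟨f⟩ "factor" "")) then
        "Gradually increase daily physical activity, starting with walking" :: init
      else init)
      = (match pvPick f with | some r => r :: init | none => init) := by
      unfold pvPick; split_ifs <;> simp_all
    rw [hstep]
    cases hp : pvPick f <;> simp only
    · exact ih init
    · rw [ih]; simp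

-- The early-exit collector computes a take-limited filterMap.
lemma pvCollect_eq (l : List (List (String × String))) (out : List String)
    (h : out.length ≤ 5) :
    pvCollect l out = out ++ (l.filterMap pvPick).take (5 - out.length) := by
  induction l generalizing out with
  | nil => simp [pvCollect]
  | cons f t ih =>
    unfold pvCollect
    by_cases h5 : out.length = 5
    · simp [h5]
    · have hlt : out.length < 5 := lt_of_le_of_ne h h5
      simp only [beq_iff_eq, h5, if_false, List.filterMap_cons]
      cases hp : pvPick f with
      | none => simp only; exact ih out h
      | some r =>
        simp only
        rw [ih (out ++ [r]) (by simp; omega)]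
        have : 5 - out.length = (5 - (out ++ [r]).length) + 1 := by simp; omega
        rw [this]
        simp [List.take_succ_cons]

-- ===== VERDICT (by name: the statement is the Claim_ definition above) =====
theorem get_default_recommendations_py_spec : Claim_equal_get_default_recommendations_py := by
  intro rf _
  unfold Spec_get_default_recommendations_py get_default_recommendations_py get_default_recommendations_py_alt
  simp only
  rw [pvA_fold, pvCollect_eq _ _ (by simp)]
  have h5 : ∀ (Y : List String), PySem.List.slice Y none (some 5) = Y.take 5 := by
    intro Y
    have := PySem.List.slice_to_natCast Y 5
    norm_num at this
    exact this
  rw [h5]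
  simp only [List.nil_append, List.filterMap_reverse, List.length_nil, Nat.sub_zero,
    List.take_append, List.length_take]
  congr 2
  omega
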